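-- pv_equiv track=rewrite | github.com/SaarShai/Primes-Equispaced | experiments/rho_bound_verify2.py | mobius
-- ===== SOURCE A (Python) =====
-- def mobius(n):
--     if n == 1: return 1
--     temp = n; d = 2; factors = 0
--     while d * d <= temp:
--         if temp % d == 0:
--             factors += 1; temp //= d
--             if temp % d == 0: return 0
--         d += 1
--     if temp > 1: factors += 1
--     return (-1) ** factors
-- ===== SOURCE B (Python) =====
-- def mobius(n):
--     if n < 2:
--         return 1
--     # Pass 1: n has a square factor iff d*d divides n for some d >= 2 with d*d <= n.
--     d = 2
--     while d * d <= n: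
--         if n % (d * d) == 0:
--             return 0
--         d += 1
--     # Pass 2: n is squarefree; the sign flips once per prime factor,
--     # computed recursively by peeling off the smallest prime factor.
--     return _sign(n)
--
-- def _sign(m):
--     d = 2
--     while d * d <= m:
--         if m % d == 0:
--             return -_sign(m // d)
--         d += 1
--     return -1 if m > 1 else 1
-- ===== Notes on version B (the rewrite author's own statement) =====
-- stated objective: alternative
-- what changed: B splits the problem into two stages: a dedicated square-factor test (does d*d divide n for some d) that never divides n, and then a recursive sign computation that peels off the smallest prime factor of the now-squarefree n, instead of A's single fused loop that divides factors out while counting them and taking a power of minus one at the end.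
import Mathlib
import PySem

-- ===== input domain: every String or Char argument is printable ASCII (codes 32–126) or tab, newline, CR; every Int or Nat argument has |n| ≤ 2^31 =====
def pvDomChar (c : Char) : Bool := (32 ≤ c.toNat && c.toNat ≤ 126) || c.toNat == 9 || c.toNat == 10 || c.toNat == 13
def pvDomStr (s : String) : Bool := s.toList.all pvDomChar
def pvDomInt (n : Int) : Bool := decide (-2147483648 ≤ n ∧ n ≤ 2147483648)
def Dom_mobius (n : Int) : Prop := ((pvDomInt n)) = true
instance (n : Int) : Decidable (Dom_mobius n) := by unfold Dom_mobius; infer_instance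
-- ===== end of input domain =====

-- B replaces A's fused divide-and-count loop by two stages: a square-factor
-- test (does d*d divide n?) and a recursive smallest-prime-factor sign.

-- ===== PORT A =====
-- Termination measures for the while-loops (cited by name in decreasing_by).
theorem pvToNatLt (a b : Int) (h1 : a < b) (h2 : 0 < b) : a.toNat < b.toNat := by omega

-- inside the loop the candidate divisor is below temp (d = 0 needs temp ≠ 0, d = 1 is excluded)
theorem pvDltTemp (temp d : Int) (h1 : d * d ≤ temp) (h0 : d = 0 → temp ≠ 0)
    (hne1 : d ≠ 1) : d < temp := by
  rcases lt_trichotomy d 0 with hd | hd | hd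
  · exact lt_of_lt_of_le (hd.trans (mul_pos_of_neg_of_neg hd hd)) h1
  · subst hd
    have ht : (0:Int) ≤ temp := by simpa using h1
    exact ht.lt_of_ne (Ne.symm (h0 rfl))
  · have hd2 : (2:Int) ≤ d := by
      rcases eq_or_lt_of_le (Int.add_one_le_iff.mpr hd) with hd1 | hd1
      · exact absurd hd1.symm hne1
      · exact hd1
    exact lt_of_lt_of_le (lt_two_mul_self hd)
      (le_trans (mul_le_mul_of_nonneg_right hd2 hd.le) h1)

theorem pvLoopDec1 (temp d step : Int) (hs : 1 ≤ step) (h1 : d * d ≤ temp)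
    (h2 : PySem.Int.mod temp d = 0)
    (h3 : ¬ PySem.Int.mod (PySem.Int.floordiv temp d) d = 0) :
    (PySem.Int.floordiv temp d - (d + step)).toNat < (temp - d).toNat := by
  have hq := PySem.Int.floordiv_mul_add_mod temp d
  rw [h2, add_zero] at hq
  set q := PySem.Int.floordiv temp d with hqdef
  have h0 : d = 0 → temp ≠ 0 := by
    intro hd0 ht0
    apply h3
    rw [hqdef, hd0, ht0]; decide
  have hne1 : d ≠ 1 := by
    intro hd1
    apply h3
    rw [hd1]
    exact (PySem.Int.mod_eq_zero_iff_dvd q 1).mpr (one_dvd _)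
  have hdt : d < temp := pvDltTemp temp d h1 h0 hne1
  have htpos : (0:Int) < temp := by
    rcases lt_trichotomy d 0 with hd | hd | hd
    · exact lt_of_lt_of_le (mul_pos_of_neg_of_neg hd hd) h1
    · have ht : (0:Int) ≤ temp := by rw [hd] at h1; simpa using h1
      exact ht.lt_of_ne (Ne.symm (h0 hd))
    · exact lt_trans hd hdt
  have hqt : q < temp := by
    rcases lt_trichotomy d 0 with hd | hd | hd
    · rcases le_or_gt 0 q with hq0 | hq0
      · exfalso
        have hle : temp ≤ 0 := hq ▸ mul_nonpos_of_nonneg_of_nonpos hq0 hd.le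
        exact absurd htpos (not_lt.mpr hle)
      · exact lt_trans hq0 htpos
    · exfalso
      apply h0 hd
      rw [← hq, hd, mul_zero]
    · have hd1 : (1:Int) < d := lt_of_le_of_ne (Int.add_one_le_iff.mpr hd) (Ne.symm hne1)
      rcases eq_or_lt_of_le (le_of_not_gt (fun hqneg : 0 > q =>
        absurd (hq ▸ mul_neg_of_neg_of_pos hqneg (lt_trans one_pos hd1)) (not_lt.mpr htpos.le))) with hq0 | hq0
      · exact hq0 ▸ htpos
      · exact hq ▸ lt_mul_right hq0 hd1
  have hstep : q - (d + step) ≤ q - d := sub_le_sub_left (le_add_of_nonneg_right (le_trans zero_le_one hs)) q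
  exact pvToNatLt _ _ (lt_of_le_of_lt hstep (sub_lt_sub_right hqt d)) (sub_pos.mpr hdt)

theorem pvLoopDec2 (temp d step : Int) (hs : 1 ≤ step) (h1 : d * d ≤ temp)
    (h2 : ¬ PySem.Int.mod temp d = 0) :
    (temp - (d + step)).toNat < (temp - d).toNat := by
  have h0 : d = 0 → temp ≠ 0 := by
    intro hd0 ht0
    apply h2
    rw [hd0, ht0]; decide
  have hne1 : d ≠ 1 := by
    intro hd1
    apply h2
    rw [hd1]
    exact (PySem.Int.mod_eq_zero_iff_dvd temp 1).mpr (one_dvd _)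
  exact pvToNatLt _ _
    (sub_lt_sub_left (lt_add_of_pos_right d (lt_of_lt_of_le one_pos hs)) temp)
    (sub_pos.mpr (pvDltTemp temp d h1 h0 hne1))

-- A's while loop; `factors` is a Nat counter: in the Python it is an int that
-- stays ≥ 0, so (-1) ** factors is exactly (-1 : Int) ^ factors here.
def mobiusLoopA (temp d : Int) (factors : Nat) : Int :=
  if _h1 : d * d ≤ temp then
    if _h2 : PySem.Int.mod temp d = 0 then
      if _h3 : PySem.Int.mod (PySem.Int.floordiv temp d) d = 0 then 0
      else mobiusLoopA (PySem.Int.floordiv temp d) (d + 1) (factors + 1)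
    else mobiusLoopA temp (d + 1) factors
  else if temp > 1 then (-1) ^ (factors + 1) else (-1) ^ factors
termination_by (temp - d).toNat
decreasing_by
  · exact pvLoopDec1 temp d 1 (le_refl 1) _h1 _h2 _h3
  · exact pvLoopDec2 temp d 1 (le_refl 1) _h1 _h2

def mobius (n : Int) : Int :=
  if n = 1 then 1 else mobiusLoopA n 2 0

-- ===== PORT B =====
-- termination helper for the d += 1 loops of B (cited in decreasing_by)
theorem pvBDec (n d : Int) (hd : 2 ≤ d) (h1 : d * d ≤ n) :
    (n - (d + 1)).toNat < (n - d).toNat := by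
  have : d < n := by nlinarith
  omega

-- Pass 1: `while d*d <= n: if n % (d*d) == 0: return 0; d += 1`, as a Bool
-- ("has a square divisor d*d with d ≥ 2").  The `2 ≤ d` conjunct of the guard
-- is a totality guard only: in the Python d starts at 2 and only increases.
def sqLoop (n d : Int) : Bool :=
  if _h : 2 ≤ d ∧ d * d ≤ n then
    if PySem.Int.mod n (d * d) = 0 then true
    else sqLoop n (d + 1)
  else false
termination_by (n - d).toNat
decreasing_by exact pvBDec n d _h.1 _h.2

-- Pass 2 (_sign in Source B): recursive smallest-factor sign.  Same totality guard.
def osLoop (m d : Int) : Int :=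
  if _h : 2 ≤ d ∧ d * d ≤ m then
    if _h2 : PySem.Int.mod m d = 0 then -osLoop (PySem.Int.floordiv m d) 2
    else osLoop m (d + 1)
  else if m > 1 then -1 else 1
termination_by (m.toNat, (m - d).toNat)
decreasing_by
  · apply Prod.Lex.left
    have hq := PySem.Int.floordiv_mul_add_mod m d
    rw [_h2, add_zero] at hq
    set q := PySem.Int.floordiv m d
    have hm : 4 ≤ m := by nlinarith [_h.1, _h.2]
    have hqpos : 0 < q := by nlinarith
    have : q < m := by nlinarith
    omega
  · apply Prod.Lex.right
    exact pvBDec m d _h.1 _h.2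

def mobius_alt (n : Int) : Int :=
  if n < 2 then 1
  else if sqLoop n 2 then 0
  else osLoop n 2

-- ===== PRECONDITION & SPEC =====
def Spec_mobius (n : Int) (out : Int) : Prop := out = mobius_alt n
instance (n : Int) (out : Int) : Decidable (Spec_mobius n out) := by unfold Spec_mobius; infer_instance

-- ===== CLAIM (what is proved, stated in full; the proofs are below) =====
def Claim_equal_mobius : Prop := ∀ (n : Int), Dom_mobius n → Spec_mobius n (mobius n)

-- ===== LEMMAS AND PROOFS =====

-- the smallest divisor d ≥ 2 of temp is prime
lemma minDvd_prime (temp d : Int) (hd : 2 ≤ d) (hdt : d ∣ temp)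
    (hmin : ∀ e : Int, 2 ≤ e → e < d → ¬ e ∣ temp) : Nat.Prime d.natAbs := by
  rw [Nat.prime_def_lt]
  refine ⟨by omega, fun m hm hmd => ?_⟩
  by_contra hne
  have hm2 : 2 ≤ m := by
    rcases Nat.lt_or_ge m 2 with h | h
    · interval_cases m
      · exact absurd (Nat.eq_zero_of_zero_dvd hmd) (by omega)
      · exact absurd rfl hne
    · exact h
  have hcast : ((m : Int)) ∣ d := by
    have : d = (d.natAbs : Int) := by omega
    rw [this]
    exact_mod_cast hmd
  exact hmin (m : Int) (by exact_mod_cast hm2) (by omega) (hcast.trans hdt)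

-- crux: when d is prime and does not divide q, x² divides q·d iff it divides q
lemma sq_dvd_cancel (d q x : Int) (hp : Nat.Prime d.natAbs) (hdq : ¬ d ∣ q) :
    (x * x ∣ q * d ↔ x * x ∣ q) := by
  have hND : ¬ (d.natAbs ∣ q.natAbs) := fun h => hdq (Int.natAbs_dvd_natAbs.mp h)
  have key : (x.natAbs * x.natAbs ∣ q.natAbs * d.natAbs ↔ x.natAbs * x.natAbs ∣ q.natAbs) := by
    by_cases hDX : d.natAbs ∣ x.natAbs
    · constructor
      · intro h
        exfalso
        have h2 : d.natAbs * d.natAbs ∣ q.natAbs * d.natAbs :=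
          dvd_trans (mul_dvd_mul hDX hDX) h
        have : d.natAbs ∣ q.natAbs :=
          (mul_dvd_mul_iff_right (Nat.Prime.ne_zero hp)).mp h2
        exact hND this
      · intro h
        exact absurd (dvd_trans (hDX.trans (dvd_mul_right x.natAbs x.natAbs)) h) hND
    · have cop : Nat.Coprime d.natAbs x.natAbs :=
        (Nat.Prime.coprime_iff_not_dvd hp).mpr hDX
      have cop2 : Nat.Coprime (x.natAbs * x.natAbs) d.natAbs :=
        (cop.mul_right cop).symm
      constructor
      · intro h
        exact Nat.Coprime.dvd_of_dvd_mul_right cop2 h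
      · intro h
        exact h.mul_right d.natAbs
  constructor
  · intro h
    have := key.mp (by rw [← Int.natAbs_mul, ← Int.natAbs_mul]; exact Int.natAbs_dvd_natAbs.mpr h)
    rw [← Int.natAbs_mul] at this
    exact Int.natAbs_dvd_natAbs.mp this
  · intro h
    exact h.mul_right d

-- characterization of pass 1: it finds exactly the square divisors ≥ d
lemma sqChar (k : Nat) : ∀ (n d : Int), (n - d).toNat ≤ k → 2 ≤ d →
    (sqLoop n d = true ↔ ∃ x : Int, d ≤ x ∧ x * x ≤ n ∧ x * x ∣ n) := by
  induction k with
  | zero =>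
    intro n d hk hd
    have h1 : ¬ (d * d ≤ n) := by
      intro h; nlinarith [show n ≤ d by omega]
    rw [sqLoop, dif_neg (fun h : 2 ≤ d ∧ d * d ≤ n => h1 h.2)]
    constructor
    · intro h; exact absurd h (by simp)
    · rintro ⟨x, hx1, hx2, -⟩
      exact absurd hx2 (by nlinarith)
  | succ k ih =>
    intro n d hk hd
    rw [sqLoop]
    by_cases h1 : d * d ≤ n
    · rw [dif_pos ⟨hd, h1⟩]
      by_cases h2 : PySem.Int.mod n (d * d) = 0
      · rw [if_pos h2]
        exact iff_of_true rfl
          ⟨d, le_refl d, h1, (PySem.Int.mod_eq_zero_iff_dvd n (d * d)).mp h2⟩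
      · rw [if_neg h2]
        have hdn : d < n := by nlinarith
        have hrec := ih n (d + 1) (by omega) (by omega)
        rw [hrec]
        constructor
        · rintro ⟨x, hx1, hx2, hx3⟩
          exact ⟨x, by omega, hx2, hx3⟩
        · rintro ⟨x, hx1, hx2, hx3⟩
          by_cases hxd : x = d
          · exact absurd ((PySem.Int.mod_eq_zero_iff_dvd n (d * d)).mpr (hxd ▸ hx3)) h2
          · exact ⟨x, by omega, hx2, hx3⟩
    · rw [dif_neg (fun h : 2 ≤ d ∧ d * d ≤ n => h1 h.2)]
      constructor
      · intro h; exact absurd h (by simp)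
      · rintro ⟨x, hx1, hx2, -⟩
        have : d * d ≤ x * x := by nlinarith
        exact absurd hx2 (by omega)

-- pass 2 steps past a non-divisor
lemma osSkip (m e : Int) (he : 2 ≤ e) (hne : ¬ e ∣ m) : osLoop m e = osLoop m (e + 1) := by
  rw [osLoop]
  by_cases h : e * e ≤ m
  · rw [dif_pos ⟨he, h⟩,
      dif_neg (fun hmod => hne ((PySem.Int.mod_eq_zero_iff_dvd m e).mp hmod))]
  · rw [dif_neg (fun hg : 2 ≤ e ∧ e * e ≤ m => h hg.2), osLoop,
      dif_neg (fun hg : 2 ≤ e + 1 ∧ (e + 1) * (e + 1) ≤ m => h (by nlinarith [hg.2]))]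

-- pass 2 steps past a whole range of non-divisors
lemma osRange (j : Nat) : ∀ (m e : Int), 2 ≤ e →
    (∀ x : Int, e ≤ x → x < e + (j : Int) → ¬ x ∣ m) →
    osLoop m e = osLoop m (e + (j : Int)) := by
  induction j with
  | zero => intro m e _ _; simp
  | succ j ih =>
    intro m e he hx
    have h1 : osLoop m e = osLoop m (e + 1) :=
      osSkip m e he (hx e (le_refl e) (by push_cast; omega))
    have h2 := ih m (e + 1) (by omega)
      (fun x hx1 hx2 => hx x (by omega) (by push_cast at hx2 ⊢; omega))
    rw [h1, h2]
    congr 1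
    push_cast
    ring

-- main simulation: A's fused loop equals B's two stages, from any state with
-- no divisor of temp below d
lemma loop_main (k : Nat) : ∀ (temp d : Int) (f : Nat), (temp - d).toNat ≤ k →
    2 ≤ d → 0 < temp → (∀ e : Int, 2 ≤ e → e < d → ¬ e ∣ temp) →
    mobiusLoopA temp d f = (if sqLoop temp d then 0 else (-1 : Int) ^ f * osLoop temp d) := by
  induction k with
  | zero =>
    intro temp d f hk hd ht hmin
    have h1 : ¬ (d * d ≤ temp) := by
      intro h; nlinarith [show temp ≤ d by omega]
    rw [mobiusLoopA, dif_neg h1, sqLoop,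
      dif_neg (fun h : 2 ≤ d ∧ d * d ≤ temp => h1 h.2), osLoop,
      dif_neg (fun h : 2 ≤ d ∧ d * d ≤ temp => h1 h.2)]
    by_cases h2 : temp > 1 <;> simp [h2, pow_succ]
  | succ k ih =>
    intro temp d f hk hd ht hmin
    rw [mobiusLoopA]
    by_cases h1 : d * d ≤ temp
    · rw [dif_pos h1]
      by_cases h2 : PySem.Int.mod temp d = 0
      · rw [dif_pos h2]
        have hq := PySem.Int.floordiv_mul_add_mod temp d
        rw [h2, add_zero] at hq
        set q := PySem.Int.floordiv temp d with hqdef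
        have hdvd : d ∣ temp := (PySem.Int.mod_eq_zero_iff_dvd temp d).mp h2
        have hqpos : 0 < q := by nlinarith
        have hqt : q ∣ temp := hq ▸ dvd_mul_right q d
        by_cases h3 : PySem.Int.mod q d = 0
        · rw [dif_pos h3]
          have hdq : d ∣ q := (PySem.Int.mod_eq_zero_iff_dvd q d).mp h3
          have hsq : sqLoop temp d = true := by
            rw [sqLoop, dif_pos ⟨hd, h1⟩,
              if_pos ((PySem.Int.mod_eq_zero_iff_dvd temp (d * d)).mpr
                (hq ▸ (by rw [mul_comm d d]; exact mul_dvd_mul_right hdq d)))]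
          rw [hsq, if_pos rfl]
        · rw [dif_neg h3]
          have hdq : ¬ d ∣ q := fun h => h3 ((PySem.Int.mod_eq_zero_iff_dvd q d).mpr h)
          have hprime := minDvd_prime temp d hd hdvd hmin
          have hminq : ∀ e : Int, 2 ≤ e → e < d + 1 → ¬ e ∣ q := by
            intro e he1 he2 hediv
            by_cases hed : e = d
            · exact hdq (hed ▸ hediv)
            · exact hmin e he1 (by omega) (hediv.trans hqt)
          have hIH := ih q (d + 1) (f + 1)
            (by have := pvLoopDec1 temp d 1 (le_refl 1) h1 h2 h3; omega)
            (by omega) hqpos hminq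
          rw [hIH]
          -- sqLoop temp d steps to d+1 (d² ∤ temp since d ∤ q)
          have hnd2 : ¬ PySem.Int.mod temp (d * d) = 0 := by
            intro h
            have : d * d ∣ q * d := hq ▸ (PySem.Int.mod_eq_zero_iff_dvd temp (d * d)).mp h
            exact hdq ((mul_dvd_mul_iff_right (show d ≠ 0 by omega)).mp
              (by rwa [mul_comm d d] at this))
          have hsq1 : sqLoop temp d = sqLoop temp (d + 1) := by
            rw [sqLoop, dif_pos ⟨hd, h1⟩, if_neg hnd2]
          -- sqLoop temp (d+1) = sqLoop q (d+1) via the characterization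
          have hc1 := sqChar (temp - (d + 1)).toNat temp (d + 1) (le_refl _) (by omega)
          have hc2 := sqChar (q - (d + 1)).toNat q (d + 1) (le_refl _) (by omega)
          have hsq2 : sqLoop temp (d + 1) = sqLoop q (d + 1) := by
            rw [Bool.eq_iff_iff, hc1, hc2]
            constructor
            · rintro ⟨x, hx1, hx2, hx3⟩
              have hxq : x * x ∣ q := (sq_dvd_cancel d q x hprime hdq).mp (hq ▸ hx3)
              exact ⟨x, hx1, Int.le_of_dvd hqpos hxq, hxq⟩
            · rintro ⟨x, hx1, hx2, hx3⟩
              refine ⟨x, hx1, ?_, hq ▸ hx3.mul_right d⟩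
              nlinarith
          -- osLoop temp d = -osLoop q 2 and advance q's scan to d+1
          have hos1 : osLoop temp d = -osLoop q 2 := by
            rw [osLoop, dif_pos ⟨hd, h1⟩, dif_pos h2]
          have hos2 : osLoop q 2 = osLoop q (d + 1) := by
            have := osRange (d - 1).toNat q 2 (by omega)
              (fun x hx1 hx2 => hminq x hx1 (by omega))
            rwa [show (2 : Int) + ((d - 1).toNat : Int) = d + 1 by omega] at this
          rw [hsq1, hsq2, hos1, hos2]
          by_cases hb : sqLoop q (d + 1)
          · rw [if_pos hb, if_pos hb]
          · simp only [Bool.not_eq_true] at hb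
            rw [if_neg (by simp [hb]), if_neg (by simp [hb]), pow_succ]
            ring
      · rw [dif_neg h2]
        have hnd : ¬ d ∣ temp := fun h => h2 ((PySem.Int.mod_eq_zero_iff_dvd temp d).mpr h)
        have hmin' : ∀ e : Int, 2 ≤ e → e < d + 1 → ¬ e ∣ temp := by
          intro e he1 he2
          by_cases hed : e = d
          · exact hed ▸ hnd
          · exact hmin e he1 (by omega)
        have hIH := ih temp (d + 1) f
          (by have := pvLoopDec2 temp d 1 (le_refl 1) h1 h2; omega)
          (by omega) ht hmin'
        rw [hIH]
        have hsq : sqLoop temp d = sqLoop temp (d + 1) := by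
          rw [sqLoop, dif_pos ⟨hd, h1⟩, if_neg (fun h =>
            hnd ((dvd_mul_right d d).trans
              ((PySem.Int.mod_eq_zero_iff_dvd temp (d * d)).mp h)))]
        rw [hsq, osSkip temp d hd hnd]
    · rw [dif_neg h1, sqLoop,
        dif_neg (fun h : 2 ≤ d ∧ d * d ≤ temp => h1 h.2), osLoop,
        dif_neg (fun h : 2 ≤ d ∧ d * d ≤ temp => h1 h.2)]
      by_cases h2 : temp > 1 <;> simp [h2, pow_succ]

-- ===== VERDICT (by name: the statement is the Claim_ definition above) =====
theorem mobius_spec : Claim_equal_mobius := by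
  intro n _hdom
  unfold Spec_mobius mobius mobius_alt
  by_cases h1 : n = 1
  · rw [if_pos h1, if_pos (by omega : n < 2)]
  · rw [if_neg h1]
    by_cases h2 : n < 2
    · rw [if_pos h2, mobiusLoopA, dif_neg (by omega : ¬ (2 : Int) * 2 ≤ n),
        if_neg (by omega : ¬ n > 1)]
      norm_num
    · rw [if_neg h2]
      have := loop_main (n - 2).toNat n 2 0 (le_refl _) (by omega) (by omega)
        (fun e he1 he2 => absurd (lt_of_le_of_lt he1 he2) (lt_irrefl 2))
      rw [this, pow_zero, one_mul]
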